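-- pv_equiv track=rewrite | github.com/ellismckenzielee/codewars-python | simple_fun_156.py | rotate_paper
-- ===== SOURCE A (Python) =====
-- mapping = {
--     '2': '2',
--     '5': '5',
--     '6': '9',
--     '8': '8',
--     '9': '6',
--     '0': '0'
-- }
--
-- def rotate_paper(numbers):
--     reversed_numbers = ''
--     mapping_keys = mapping.keys()
--     for num in list(numbers):
--         if num not in mapping_keys:
--             return False
--         else:
--             reversed_numbers += mapping[num]
--     return reversed_numbers[::-1] == numbers
-- ===== SOURCE B (Python) =====
-- mapping = {
--     '2': '2',
--     '5': '5',
--     '6': '9',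
--     '8': '8',
--     '9': '6',
--     '0': '0'
-- }
--
-- def rotate_paper(numbers):
--     n = len(numbers)
--     for i in range(n):
--         m = mapping.get(numbers[i])
--         if m is None or m != numbers[n - 1 - i]:
--             return False
--     return True
-- ===== Notes on version B (the rewrite author's own statement) =====
-- stated objective: simpler
-- what changed: B drops A's build-the-mapped-string-then-reverse-and-compare pass: it checks each position i directly against the mirror position n-1-i in a single index loop with no intermediate string.
import Mathlib
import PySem

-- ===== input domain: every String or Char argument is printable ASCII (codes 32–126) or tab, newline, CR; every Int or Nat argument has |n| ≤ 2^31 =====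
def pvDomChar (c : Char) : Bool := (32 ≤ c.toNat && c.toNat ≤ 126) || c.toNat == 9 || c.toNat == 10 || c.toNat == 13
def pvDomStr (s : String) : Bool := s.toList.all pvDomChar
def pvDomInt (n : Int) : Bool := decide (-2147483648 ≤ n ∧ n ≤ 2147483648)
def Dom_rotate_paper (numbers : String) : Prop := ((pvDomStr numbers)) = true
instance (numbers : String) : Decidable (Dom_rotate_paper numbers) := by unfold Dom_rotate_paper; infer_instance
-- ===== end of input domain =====

-- B replaces A's build-mapped-string/reverse/compare pass by a direct mirror-position
-- index loop with no intermediate string (objective: simpler).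

-- shared module-level constant: the rotation table
def rpMapping : PySem.Dict Char Char :=
  PySem.Dict.ofList [('2','2'),('5','5'),('6','9'),('8','8'),('9','6'),('0','0')]

-- ===== PORT A =====
-- loop: reversed_numbers accumulates mapping[num]; early 'return False' on a missing key;
-- at the end, reversed_numbers[::-1] == numbers
def rotateA (full : List Char) (acc : List Char) : List Char → Bool
  | [] => acc.reverse == full
  | c :: rest =>
    match PySem.Dict.get? rpMapping c with
    | none => false
    | some m => rotateA full (acc ++ [m]) rest

def rotate_paper (numbers : String) : Bool :=
  rotateA numbers.toList [] numbers.toList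

-- ===== PORT B =====
-- for i in range(n): m = mapping.get(numbers[i]); if m is None or m != numbers[n-1-i]: return False
-- (indices i and n-1-i are in range, so numbers[i] is ported as getD; exact there)
def rotateB (l : List Char) (n i : Nat) : Bool :=
  if i < n then
    match PySem.Dict.get? rpMapping (l.getD i ' ') with
    | none => false
    | some m => if m = l.getD (n - 1 - i) ' ' then rotateB l n (i + 1) else false
  else true
termination_by n - i

def rotate_paper_alt (numbers : String) : Bool :=
  rotateB numbers.toList numbers.toList.length 0

-- ===== PRECONDITION & SPEC =====
def Spec_rotate_paper (numbers : String) (out : Bool) : Prop := out = rotate_paper_alt numbers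
instance (numbers : String) (out : Bool) : Decidable (Spec_rotate_paper numbers out) := by unfold Spec_rotate_paper; infer_instance

-- ===== CLAIM (what is proved, stated in full; the proofs are below) =====
def Claim_equal_rotate_paper : Prop := ∀ (numbers : String), Dom_rotate_paper numbers → Spec_rotate_paper numbers (rotate_paper numbers)

-- ===== LEMMAS AND PROOFS =====

-- characterisation of A's loop
theorem rotateA_eq (full : List Char) :
    ∀ (l acc : List Char),
      rotateA full acc l =
        decide (acc.map some ++ l.map (PySem.Dict.get? rpMapping) = full.reverse.map some) := by
  intro l
  induction l with
  | nil =>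
    intro acc
    simp only [rotateA, List.map_nil, List.append_nil]
    have hb : (acc.reverse == full) = decide (acc.reverse = full) := by
      by_cases h : acc.reverse = full <;> simp [h]
    rw [hb, decide_eq_decide]
    constructor
    · intro h; subst h; simp
    · intro h
      have h2 := List.map_injective_iff.2 (Option.some_injective _) h
      rw [h2]; simp
  | cons c rest ih =>
    intro acc
    simp only [rotateA]
    cases hc : PySem.Dict.get? rpMapping c with
    | none =>
      symm
      simp only [decide_eq_false_iff_not, List.map_cons, hc]
      intro h
      have hmem : (none : Option Char) ∈ full.reverse.map some := by
        rw [← h]; simp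
      simp at hmem
    | some m =>
      have hred : (match (some m : Option Char) with
          | none => false
          | some m => rotateA full (acc ++ [m]) rest) = rotateA full (acc ++ [m]) rest := rfl
      rw [hred, ih, decide_eq_decide]
      simp [hc]

theorem rotateA_eq' (full : List Char) (l : List Char) :
    rotateA full [] l =
      decide (l.map (PySem.Dict.get? rpMapping) = full.reverse.map some) := by
  simpa using rotateA_eq full l []

-- characterisation of B's loop
theorem rotateB_eq (l : List Char) (n i : Nat) :
    rotateB l n i =
      decide (∀ k, i ≤ k → k < n →
        PySem.Dict.get? rpMapping (l.getD k ' ') = some (l.getD (n - 1 - k) ' ')) := by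
  fun_induction rotateB l n i with
  | case1 i h hc =>
    symm
    simp only [decide_eq_false_iff_not]
    intro hall
    have hi := hall i le_rfl h
    rw [hc] at hi
    simp at hi
  | case2 i h hc ih =>
    rw [ih, decide_eq_decide]
    constructor
    · intro hall k hik hkn
      rcases Nat.eq_or_lt_of_le hik with rfl | hlt
      · exact hc
      · exact hall k hlt hkn
    · intro hall k hik hkn
      exact hall k (Nat.le_of_lt (Nat.lt_of_lt_of_le (Nat.lt_succ_self i) (Nat.le_of_lt_succ (Nat.lt_succ_of_le hik)))) hkn
  | case3 i h m hc hne =>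
    symm
    simp only [decide_eq_false_iff_not]
    intro hall
    have hi := hall i le_rfl h
    rw [hc, Option.some.injEq] at hi
    exact hne hi
  | case4 i h =>
    symm
    simp only [decide_eq_true_eq]
    intro k hik hkn
    omega

-- the two characterisations agree
theorem core_iff (l : List Char) :
    (l.map (PySem.Dict.get? rpMapping) = l.reverse.map some) ↔
      (∀ k, k < l.length →
        PySem.Dict.get? rpMapping (l.getD k ' ') = some (l.getD (l.length - 1 - k) ' ')) := by
  constructor
  · intro h k hk
    have hk2 : l.length - 1 - k < l.length := by omega
    rw [List.getD_eq_getElem l ' ' hk, List.getD_eq_getElem l ' ' hk2]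
    have h1 : (l.map (PySem.Dict.get? rpMapping))[k]'(by simp [hk]) =
        (l.reverse.map some)[k]'(by simp [hk]) := by simp only [h]
    simpa using h1
  · intro h
    apply List.ext_getElem (by simp)
    intro k h1 h2
    simp only [List.length_map] at h1
    have hk2 : l.length - 1 - k < l.length := by omega
    have hi := h k h1
    rw [List.getD_eq_getElem l ' ' h1, List.getD_eq_getElem l ' ' hk2] at hi
    simpa using hi

-- ===== VERDICT (by name: the statement is the Claim_ definition above) =====
theorem rotate_paper_spec : Claim_equal_rotate_paper := by
  intro numbers _
  unfold Spec_rotate_paper rotate_paper rotate_paper_alt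
  rw [rotateA_eq', rotateB_eq, decide_eq_decide, core_iff]
  constructor
  · intro h k _ hk; exact h k hk
  · intro h k hk; exact h k (Nat.zero_le k) hk
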